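-- pv_equiv track=rewrite | github.com/robert-iw3/repo | detect_rules/suricata/parse_suricata_rules.py | split_rules
-- ===== SOURCE A (Python) =====
-- from typing import List, Dict, Optional
--
-- def split_rules(content: str) -> List[str]:
--     """Split content into individual rules"""
--     rules = []
--     current_rule = []
--     in_rule = False
--
--     for line in content.splitlines():
--         line = line.strip()
--         if not line or line.startswith('#'):
--             continue
--         if line.startswith('alert') and not in_rule:
--             in_rule = True
--             current_rule = [line]
--         elif in_rule:
--             current_rule.append(line)
--             if line.endswith(';'):
--                 rules.append('\n'.join(current_rule))
--                 in_rule = False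
--                 current_rule = []
--
--     if current_rule and in_rule:
--         rules.append('\n'.join(current_rule))
--     return rules
-- ===== SOURCE B (Python) =====
-- def split_rules(content: str):
--     """Split content into individual rules"""
--     lines = [s for s in (ln.strip() for ln in content.splitlines())
--              if s and not s.startswith('#')]
--     rules = []
--     n = len(lines)
--     i = 0
--     while i < n:
--         if not lines[i].startswith('alert'):
--             i += 1
--             continue
--         current_rule = [lines[i]]
--         i += 1
--         while i < n:
--             current_rule.append(lines[i])
--             i += 1
--             if current_rule[-1].endswith(';'):
--                 break
--         rules.append('\n'.join(current_rule))
--     return rules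
-- ===== Notes on version B (the rewrite author's own statement) =====
-- stated objective: alternative
-- what changed: Instead of a single flag-driven state machine over the raw lines, B first builds the cleaned line list and then runs an outer scan that finds each rule-opening line and an inner loop that collects lines until a semicolon-terminated one, emitting the joined rule after each inner loop.
import Mathlib
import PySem

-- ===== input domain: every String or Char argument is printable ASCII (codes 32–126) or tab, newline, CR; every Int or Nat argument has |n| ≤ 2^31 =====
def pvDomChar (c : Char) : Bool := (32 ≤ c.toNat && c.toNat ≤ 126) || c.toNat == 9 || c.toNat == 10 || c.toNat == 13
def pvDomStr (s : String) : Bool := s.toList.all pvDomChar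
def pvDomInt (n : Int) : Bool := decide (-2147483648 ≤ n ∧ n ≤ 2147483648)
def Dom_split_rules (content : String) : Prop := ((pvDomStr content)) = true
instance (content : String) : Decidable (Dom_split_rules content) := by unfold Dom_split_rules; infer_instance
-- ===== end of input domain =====

-- B is the same split but by a different decomposition: clean the line list first, then an
-- outer scan for 'alert' lines with an inner collect-until-';' loop (objective: alternative).

-- ===== PORT A =====
-- loop body of A, on the already-stripped, non-skipped line
def pvStepCore (st : List String × List String × Bool) (line : String) :
    List String × List String × Bool :=
  if PySem.Str.startswith line "alert" && !st.2.2 then (st.1, [line], true)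
  else if st.2.2 then
    let current := st.2.1 ++ [line]
    if PySem.Str.endswith line ";" then (st.1 ++ [PySem.Str.join "\n" current], [], false)
    else (st.1, current, true)
  else st

-- one iteration of A's for-loop: strip, skip blanks and comments, else the body above
def pvStepA (st : List String × List String × Bool) (line0 : String) :
    List String × List String × Bool :=
  let line := PySem.Str.strip line0
  if (line == "") || PySem.Str.startswith line "#" then st else pvStepCore st line

def split_rules (content : String) : List String :=
  let st := (PySem.Str.splitlines content).foldl pvStepA ([], [], false)
  if st.2.1 ≠ [] ∧ st.2.2 = true then st.1 ++ [PySem.Str.join "\n" st.2.1] else st.1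

-- ===== PORT B =====
-- the cleaned line list (Source B's comprehension)
def pvClean (content : String) : List String :=
  ((PySem.Str.splitlines content).map PySem.Str.strip).filter
    (fun s => !(s == "") && !PySem.Str.startswith s "#")

-- Source B's inner while loop: lines taken into the current rule, and the remaining lines
def pvInner : List String → List String × List String
  | [] => ([], [])
  | l :: rest =>
    if PySem.Str.endswith l ";" then ([l], rest)
    else
      let p := pvInner rest
      (l :: p.1, p.2)

theorem pvInner_snd_le (ls : List String) : (pvInner ls).2.length ≤ ls.length := by
  induction ls with
  | nil => simp [pvInner]
  | cons l rest ih =>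
    simp only [pvInner]
    split
    · simp
    · simpa using Nat.le_succ_of_le ih

-- Source B's outer while loop over the cleaned lines
def pvOuter : List String → List String
  | [] => []
  | l :: rest =>
    if PySem.Str.startswith l "alert" then
      PySem.Str.join "\n" (l :: (pvInner rest).1) :: pvOuter (pvInner rest).2
    else pvOuter rest
termination_by ls => ls.length
decreasing_by
  · have := pvInner_snd_le rest; simp; omega
  · simp

def split_rules_alt (content : String) : List String := pvOuter (pvClean content)

-- ===== PRECONDITION & SPEC =====
def Spec_split_rules (content : String) (out : List String) : Prop := out = split_rules_alt content
instance (content : String) (out : List String) : Decidable (Spec_split_rules content out) := by unfold Spec_split_rules; infer_instance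

-- ===== CLAIM (what is proved, stated in full; the proofs are below) =====
def Claim_equal_split_rules : Prop := ∀ (content : String), Dom_split_rules content → Spec_split_rules content (split_rules content)

-- ===== LEMMAS AND PROOFS =====

-- A's final flush, as a function of the loop state
def pvFinish (st : List String × List String × Bool) : List String :=
  if st.2.1 ≠ [] ∧ st.2.2 = true then st.1 ++ [PySem.Str.join "\n" st.2.1] else st.1

-- folding A's full step over the raw lines = folding the core step over the cleaned lines
theorem pv_fold_clean (ls : List String) :
    ∀ st, ls.foldl pvStepA st =
      ((ls.map PySem.Str.strip).filter
        (fun s => !(s == "") && !PySem.Str.startswith s "#")).foldl pvStepCore st := by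
  induction ls with
  | nil => intro st; rfl
  | cons x xs ih =>
    intro st
    by_cases h : (!(PySem.Str.strip x == "") && !PySem.Str.startswith (PySem.Str.strip x) "#") = true
    · have hskip : ((PySem.Str.strip x == "") || PySem.Str.startswith (PySem.Str.strip x) "#") = false := by
        simp at h ⊢; tauto
      simp only [List.map_cons, List.filter_cons, h, List.foldl_cons, pvStepA, hskip,
        Bool.false_eq_true, if_false]
      exact ih _
    · have hskip : ((PySem.Str.strip x == "") || PySem.Str.startswith (PySem.Str.strip x) "#") = true := by
        simp at h ⊢; tauto
      simp only [List.map_cons, List.filter_cons, h, List.foldl_cons, pvStepA, hskip, if_true]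
      exact ih _

-- the joint loop invariant: outside a rule the fold matches pvOuter, inside it matches pvInner
theorem pv_main (n : ℕ) : ∀ ls : List String, ls.length ≤ n →
    (∀ rules : List String,
      pvFinish (ls.foldl pvStepCore (rules, [], false)) = rules ++ pvOuter ls) ∧
    (∀ (rules cur : List String), cur ≠ [] →
      pvFinish (ls.foldl pvStepCore (rules, cur, true)) =
        rules ++ PySem.Str.join "\n" (cur ++ (pvInner ls).1) :: pvOuter (pvInner ls).2) := by
  induction n with
  | zero =>
    intro ls hls
    have : ls = [] := List.eq_nil_of_length_eq_zero (Nat.le_zero.mp hls)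
    subst this
    constructor
    · intro rules; simp [pvFinish, pvOuter]
    · intro rules cur hcur; simp [pvFinish, pvInner, pvOuter, hcur]
  | succ n ih =>
    intro ls hls
    match ls with
    | [] =>
      constructor
      · intro rules; simp [pvFinish, pvOuter]
      · intro rules cur hcur; simp [pvFinish, pvInner, pvOuter, hcur]
    | l :: t =>
      have ht : t.length ≤ n := by simpa using Nat.succ_le_succ_iff.mp hls
      constructor
      · intro rules
        by_cases ha : PySem.Str.startswith l "alert" = true
        · simp only [List.foldl_cons, pvStepCore, ha, Bool.not_false, Bool.and_true,
            if_true]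
          rw [(ih t ht).2 rules [l] (by simp)]
          simp only [pvOuter]
          simp [show PySem.Chars.startswith l.toList ['a','l','e','r','t'] = true from ha]
        · have ha' : PySem.Str.startswith l "alert" = false := by simpa using ha
          simp only [List.foldl_cons, pvStepCore, ha', Bool.false_and, Bool.false_eq_true,
            if_false]
          rw [(ih t ht).1 rules]
          simp only [pvOuter]
          simp [show PySem.Chars.startswith l.toList ['a','l','e','r','t'] = false from ha']
      · intro rules cur hcur
        have hna : (PySem.Str.startswith l "alert" && !true) = false := by simp
        by_cases he : PySem.Str.endswith l ";" = true
        · simp only [List.foldl_cons, pvStepCore, hna, Bool.false_eq_true, if_false,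
            he, if_true, if_true]
          rw [(ih t ht).1]
          simp only [pvInner]
          simp [show PySem.Chars.endswith l.toList [';'] = true from he]
        · have he' : PySem.Str.endswith l ";" = false := by simpa using he
          simp only [List.foldl_cons, pvStepCore, hna, Bool.false_eq_true, if_false,
            he', if_false, if_true]
          rw [(ih t ht).2 rules (cur ++ [l]) (by simp)]
          simp only [pvInner]
          simp [show PySem.Chars.endswith l.toList [';'] = false from he']

-- ===== VERDICT (by name: the statement is the Claim_ definition above) =====
theorem split_rules_spec : Claim_equal_split_rules := by
  intro content _
  unfold Spec_split_rules split_rules split_rules_alt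
  rw [pv_fold_clean]
  have h := (pv_main (pvClean content).length (pvClean content) le_rfl).1 []
  simpa [pvFinish, pvClean] using h
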